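-- pv_equiv track=rewrite | github.com/shitian-taiger/relational-extraction | test_implementation/allen_models.py | _retrieve_tuples
-- ===== SOURCE A (Python) =====
-- def _retrieve_tuples(phrases):
--     """ Given BIO tagged phrases in a sentence, split into args and relationship
--
--     Args:
--         phrases (list): BIO tagged phrases
--     Returns:
--         rel, pre_args, post_args (list): separated phrases
--     """
--     rel, pre_args, post_args = [], [], []
--     rel_found = False
--     for phrase in phrases:
--         if "V:" in phrase:
--             rel.append(phrase)
--             rel_found = True
--         elif not rel_found:
--             pre_args.append(phrase)
--         else:
--             post_args.append(phrase)
--     return rel, pre_args, post_args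
-- ===== SOURCE B (Python) =====
-- def _retrieve_tuples(phrases):
--     pivot = next((i for i, p in enumerate(phrases) if "V:" in p), None)
--     rel = [p for p in phrases if "V:" in p]
--     if pivot is None:
--         return rel, list(phrases), []
--     pre_args = phrases[:pivot]
--     post_args = [p for p in phrases[pivot + 1:] if "V:" not in p]
--     return rel, pre_args, post_args
-- ===== Notes on version B (the rewrite author's own statement) =====
-- stated objective: alternative
-- what changed: Replaces the single flag-driven accumulator loop by first locating the pivot (index of the first phrase containing 'V:') and then building rel/pre_args/post_args with independent filter/slice passes.
import Mathlib
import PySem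

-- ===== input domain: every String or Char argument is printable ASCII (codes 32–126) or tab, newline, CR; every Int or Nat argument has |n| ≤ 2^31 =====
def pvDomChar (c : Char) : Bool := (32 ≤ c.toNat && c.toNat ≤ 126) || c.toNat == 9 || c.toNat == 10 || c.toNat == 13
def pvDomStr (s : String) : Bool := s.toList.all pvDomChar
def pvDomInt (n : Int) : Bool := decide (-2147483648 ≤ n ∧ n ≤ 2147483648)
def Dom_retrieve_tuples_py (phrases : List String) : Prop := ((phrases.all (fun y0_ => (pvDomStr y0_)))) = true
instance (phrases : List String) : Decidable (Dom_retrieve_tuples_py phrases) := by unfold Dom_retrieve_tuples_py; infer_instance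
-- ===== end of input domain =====

-- B locates the pivot (first phrase containing "V:") then builds the three lists by
-- independent filter/slice passes instead of A's single flag-driven accumulator loop;
-- alternative decomposition, same O(n) cost. Equivalence of the return values is proved below.

-- ===== PORT A =====
-- one step of A's for-loop over the state (rel, pre_args, post_args, rel_found)
def pvStepA (st : List String × List String × List String × Bool) (phrase : String) :
    List String × List String × List String × Bool :=
  let (rel, pre, post, found) := st
  if PySem.Str.isIn "V:" phrase then (rel ++ [phrase], pre, post, true)
  else if !found then (rel, pre ++ [phrase], post, found)
  else (rel, pre, post ++ [phrase], found)

def retrieve_tuples_py (phrases : List String) : List String × List String × List String :=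
  let st := phrases.foldl pvStepA ([], [], [], false)
  (st.1, st.2.1, st.2.2.1)

-- ===== PORT B =====
def retrieve_tuples_py_alt (phrases : List String) : List String × List String × List String :=
  let pivot := phrases.findIdx? (fun p => PySem.Str.isIn "V:" p)
  let rel := phrases.filter (fun p => PySem.Str.isIn "V:" p)
  match pivot with
  | none => (rel, phrases, [])
  | some i => (rel, phrases.take i, (phrases.drop (i + 1)).filter (fun p => !PySem.Str.isIn "V:" p))

-- ===== PRECONDITION & SPEC =====
def Spec_retrieve_tuples_py (phrases : List String) (out : List String × List String × List String) : Prop := out = retrieve_tuples_py_alt phrases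
instance (phrases : List String) (out : List String × List String × List String) : Decidable (Spec_retrieve_tuples_py phrases out) := by unfold Spec_retrieve_tuples_py; infer_instance

-- ===== CLAIM =====
def Claim_equal_retrieve_tuples_py : Prop := ∀ (phrases : List String), Dom_retrieve_tuples_py phrases → Spec_retrieve_tuples_py phrases (retrieve_tuples_py phrases)

-- ===== LEMMAS AND PROOFS =====
-- After the flag is set, the rest of A's loop appends the 'V:' phrases to rel and the others to post.
lemma pvLoopA_true (phrases rel pre post : List String) :
    phrases.foldl pvStepA (rel, pre, post, true) =
      (rel ++ phrases.filter (fun p => PySem.Str.isIn "V:" p), pre,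
       post ++ phrases.filter (fun p => !PySem.Str.isIn "V:" p), true) := by
  induction phrases generalizing rel post with
  | nil => simp
  | cons p rest ih =>
    by_cases h : PySem.Chars.isIn ['V', ':'] p.toList = true <;>
      simp [pvStepA, h, ih]

-- Before the flag is set, A's loop is characterised by the position of the first 'V:' phrase.
lemma pvLoopA_false (phrases rel pre post : List String) :
    phrases.foldl pvStepA (rel, pre, post, false) =
      match phrases.findIdx? (fun p => PySem.Str.isIn "V:" p) with
      | none => (rel, pre ++ phrases, post, false)
      | some i => (rel ++ phrases.filter (fun p => PySem.Str.isIn "V:" p), pre ++ phrases.take i,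
                   post ++ ((phrases.drop (i + 1)).filter (fun p => !PySem.Str.isIn "V:" p)), true) := by
  induction phrases generalizing rel pre post with
  | nil => simp
  | cons p rest ih =>
    by_cases h : PySem.Chars.isIn ['V', ':'] p.toList = true
    · simp [pvStepA, h, pvLoopA_true, List.findIdx?_cons]
    · cases hf : rest.findIdx? (fun p => PySem.Chars.isIn ['V', ':'] p.toList) with
      | none => simp [pvStepA, h, ih, hf, List.findIdx?_cons]
      | some i => simp [pvStepA, h, ih, hf, List.findIdx?_cons]

-- ===== VERDICT =====
theorem retrieve_tuples_py_spec : Claim_equal_retrieve_tuples_py := by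
  intro phrases _
  show retrieve_tuples_py phrases = retrieve_tuples_py_alt phrases
  unfold retrieve_tuples_py retrieve_tuples_py_alt
  rw [pvLoopA_false]
  cases hf : phrases.findIdx? (fun p => PySem.Str.isIn "V:" p) with
  | none =>
    rw [List.findIdx?_eq_none_iff] at hf
    simp only []
    simp [List.filter_eq_nil_iff]
    intro a ha
    simpa using hf a ha
  | some i => simp
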